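-- pv_equiv track=rewrite | github.com/MortezaDamghaniNouri/Go-Game-Player-Agent | my_player3.py | groups_finder
-- ===== SOURCE A (Python) =====
-- def is_in_groups(input_groups, input_element):
--     i = 0
--     while i < len(input_groups):
--         current_group = input_groups[i]
--         if input_element in current_group:
--             return True
--         i += 1
--     return False
--
-- def groups_finder(input_board, group_color):
--     groups = []
--     i = 0
--     board_size = len(input_board[0])
--     while i < board_size:
--         j = 0
--         while j < board_size:
--             if input_board[i][j] == group_color and (not is_in_groups(groups, [i, j])):
--                 frontier = [[i, j]]
--                 expanded = []
--                 while True: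
--                     m = frontier[0][0]
--                     n = frontier[0][1]
--                     frontier.pop(0)
--
--                     if (m + 1) < board_size and input_board[m + 1][n] == group_color and ([m + 1, n] not in frontier) and ([m + 1, n] not in expanded):
--                         frontier.append([m + 1, n])
--
--                     if (m - 1) >= 0 and input_board[m - 1][n] == group_color and ([m - 1, n] not in frontier) and ([m - 1, n] not in expanded):
--                         frontier.append([m - 1, n])
--
--                     if (n + 1) < board_size and input_board[m][n + 1] == group_color and ([m, n + 1] not in frontier) and ([m, n + 1] not in expanded):
--                         frontier.append([m, n + 1])
--
--                     if (n - 1) >= 0 and input_board[m][n - 1] == group_color and ([m, n - 1] not in frontier) and ([m, n - 1] not in expanded):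
--                         frontier.append([m, n - 1])
--
--                     expanded.append([m, n])
--                     if len(frontier) == 0:
--                         break
--
--                 groups.append(expanded)
--             j += 1
--         i += 1
--
--     return groups
-- ===== SOURCE B (Python) =====
-- def groups_finder(input_board, group_color):
--     board_size = len(input_board[0])
--     assigned = set()
--     groups = []
--     for i in range(board_size):
--         for j in range(board_size):
--             if input_board[i][j] == group_color and (i, j) not in assigned:
--                 # wavefront flood fill: expand whole distance-layers at a time,
--                 # no queue and no popping; 'seen' = every cell ever reached
--                 seen = {(i, j)}
--                 layer = [(i, j)]
--                 group = []
--                 while layer: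
--                     group += [[m, c] for m, c in layer]
--                     nxt = []
--                     for m, c in layer:
--                         for p, q in ((m + 1, c), (m - 1, c), (m, c + 1), (m, c - 1)):
--                             if 0 <= p < board_size and 0 <= q < board_size \
--                                and input_board[p][q] == group_color and (p, q) not in seen:
--                                 seen.add((p, q))
--                                 nxt.append((p, q))
--                     layer = nxt
--                 groups.append(group)
--                 assigned |= seen
--     return groups
-- ===== Notes on version B (the rewrite author's own statement) =====
-- stated objective: faster
-- what changed: B replaces A's queue-pop BFS with its linear scans of frontier/expanded/groups by a level-synchronous wavefront flood fill: whole distance-layers are appended to the group and expanded in one batch (no queue, no pop(0)), with a per-group 'seen' hash set and a global 'assigned' hash set, turning the O(n^4) scan-heavy search into an O(n^2) pass that touches each cell once.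
import Mathlib
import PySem

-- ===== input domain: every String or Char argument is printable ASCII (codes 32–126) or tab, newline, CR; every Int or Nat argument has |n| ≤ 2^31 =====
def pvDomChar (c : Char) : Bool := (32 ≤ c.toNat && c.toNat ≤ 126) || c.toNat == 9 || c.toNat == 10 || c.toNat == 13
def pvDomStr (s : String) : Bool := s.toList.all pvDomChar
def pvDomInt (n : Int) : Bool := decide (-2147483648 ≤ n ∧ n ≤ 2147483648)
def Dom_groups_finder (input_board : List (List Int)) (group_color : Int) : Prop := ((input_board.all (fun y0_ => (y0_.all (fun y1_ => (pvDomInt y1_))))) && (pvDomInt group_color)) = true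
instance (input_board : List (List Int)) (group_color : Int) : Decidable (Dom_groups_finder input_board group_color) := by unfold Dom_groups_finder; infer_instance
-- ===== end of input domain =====

-- B replaces A's queue-pop BFS with linear membership scans by a level-synchronous wavefront
-- flood fill (whole frontier layers expanded at once, hash-set dedup): same groups, O(n^2) not O(n^4).

-- ===== PORT A =====

-- board[p][q]; both Pythons index the board identically; indices are in range wherever the guards
-- admit them under Pre_, where pyGetD equals Python indexing exactly.
def pvAt (input_board : List (List Int)) (p q : Int) : Int :=
  PySem.List.pyGetD (PySem.List.pyGetD input_board p []) q 0

-- A's while-with-index over input_groups, as the obvious structural recursion on the list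
def is_in_groups (input_groups : List (List (List Int))) (input_element : List Int) : Bool :=
  match input_groups with
  | [] => false
  | current_group :: rest =>
    if input_element ∈ current_group then true else is_in_groups rest input_element

-- A's inner 'while True' BFS loop; fuel = N*N bounds the iteration count (one pop per iteration,
-- each distinct in-range cell enqueued at most once), so the fuel-0 branch is never taken on real runs.
def bfsA (input_board : List (List Int)) (group_color : Int) (N : Nat) :
    Nat → List (List Int) → List (List Int) → List (List Int)
  | 0, _, expanded => expanded
  | fuel+1, frontier, expanded =>
    match frontier with
    | [] => expanded  -- unreachable: the loop is entered and re-entered only with a nonempty frontier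
    | cell :: rest =>
      let m := PySem.List.pyGetD cell 0 0   -- frontier[0][0]; cells are always [m, n]
      let n := PySem.List.pyGetD cell 1 0   -- frontier[0][1]
      let f1 := if decide (m+1 < (N:Int)) && (pvAt input_board (m+1) n == group_color)
                   && !(rest.contains [m+1,n]) && !(expanded.contains [m+1,n])
                then rest ++ [[m+1,n]] else rest
      let f2 := if decide (0 ≤ m-1) && (pvAt input_board (m-1) n == group_color)
                   && !(f1.contains [m-1,n]) && !(expanded.contains [m-1,n])
                then f1 ++ [[m-1,n]] else f1
      let f3 := if decide (n+1 < (N:Int)) && (pvAt input_board m (n+1) == group_color)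
                   && !(f2.contains [m,n+1]) && !(expanded.contains [m,n+1])
                then f2 ++ [[m,n+1]] else f2
      let f4 := if decide (0 ≤ n-1) && (pvAt input_board m (n-1) == group_color)
                   && !(f3.contains [m,n-1]) && !(expanded.contains [m,n-1])
                then f3 ++ [[m,n-1]] else f3
      let expanded' := expanded ++ [[m, n]]
      if f4.isEmpty then expanded' else bfsA input_board group_color N fuel f4 expanded'

def groups_finder (input_board : List (List Int)) (group_color : Int) : List (List (List Int)) :=
  let board_size := (PySem.List.pyGetD input_board 0 []).length  -- len(input_board[0]); board ≠ [] under Pre_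
  (List.range board_size).foldl (fun groups (i : Nat) =>
    (List.range board_size).foldl (fun groups (j : Nat) =>
      if (pvAt input_board (i:Int) (j:Int) == group_color)
         && !(is_in_groups groups [(i:Int), (j:Int)])
      then groups ++ [bfsA input_board group_color board_size (board_size*board_size)
                        [[(i:Int), (j:Int)]] []]
      else groups) groups) []

-- ===== PORT B =====

-- the four neighbour candidates ((m+1,c),(m-1,c),(m,c+1),(m,c-1)) of Source B's inner for-loop
def pvNbrs (m n : Int) : List (Int × Int) := [(m+1,n), (m-1,n), (m,n+1), (m,n-1)]

-- body of Source B's neighbour for-loop: bounds/colour/seen guard, then mark seen + append to nxt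
def bstep (input_board : List (List Int)) (group_color : Int) (N : Nat)
    (qs : List (Int × Int) × PySem.Set (Int × Int)) (c : Int × Int) :
    List (Int × Int) × PySem.Set (Int × Int) :=
  if decide (0 ≤ c.1) && decide (c.1 < (N:Int)) && decide (0 ≤ c.2) && decide (c.2 < (N:Int))
     && (pvAt input_board c.1 c.2 == group_color) && !(PySem.Set.contains qs.2 c)
  then (qs.1 ++ [c], PySem.Set.add qs.2 c) else qs

-- Source B's 'for m, c in layer: for p, q in …' double loop collecting the next wavefront
def pvCollect (input_board : List (List Int)) (group_color : Int) (N : Nat)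
    (layer : List (Int × Int)) (acc : List (Int × Int) × PySem.Set (Int × Int)) :
    List (Int × Int) × PySem.Set (Int × Int) :=
  layer.foldl (fun a c => (pvNbrs c.1 c.2).foldl (bstep input_board group_color N) a) acc

-- Source B's 'while layer' loop: append the whole wavefront to the group, then expand it in one
-- batch; fuel = N*N bounds the number of layers (each nonempty layer holds ≥ 1 fresh cell),
-- so the fuel-0 branch is never taken on real runs; returns (group, seen)
def bfsL (input_board : List (List Int)) (group_color : Int) (N : Nat) :
    Nat → List (Int × Int) → PySem.Set (Int × Int) → List (List Int) →
    (List (List Int)) × PySem.Set (Int × Int)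
  | 0, _, seen, group => (group, seen)
  | fuel+1, layer, seen, group =>
    match layer with
    | [] => (group, seen)
    | c :: t =>
      let group' := group ++ ((c :: t).map (fun x => [x.1, x.2]))
      let ns := pvCollect input_board group_color N (c :: t) ([], seen)
      bfsL input_board group_color N fuel ns.1 ns.2 group'

def groups_finder_alt (input_board : List (List Int)) (group_color : Int) : List (List (List Int)) :=
  let board_size := (PySem.List.pyGetD input_board 0 []).length
  ((List.range board_size).foldl (fun (st : PySem.Set (Int × Int) × List (List (List Int))) (i : Nat) =>
    (List.range board_size).foldl (fun st (j : Nat) =>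
      if (pvAt input_board (i:Int) (j:Int) == group_color)
         && !(PySem.Set.contains st.1 ((i:Int), (j:Int)))
      then
        let r := bfsL input_board group_color board_size (board_size*board_size)
                   [((i:Int), (j:Int))] (PySem.Set.ofList [((i:Int), (j:Int))]) []
        (PySem.Set.union st.1 r.2, st.2 ++ [r.1])   -- assigned |= seen; groups.append(group)
      else st) st) (PySem.Set.empty, [])).2

-- ===== PRECONDITION & SPEC =====
-- Exactly where Python A returns: A reads input_board[0], then input_board[i][j] for all
-- i, j < len(input_board[0]); it raises IndexError iff the board is empty, has fewer rows than
-- len(input_board[0]), or one of those first rows is shorter than that.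
def Pre_groups_finder (input_board : List (List Int)) (group_color : Int) : Prop :=
  input_board ≠ [] ∧
  (input_board.headD []).length ≤ input_board.length ∧
  ∀ row ∈ input_board.take (input_board.headD []).length,
    (input_board.headD []).length ≤ row.length

instance (input_board : List (List Int)) (group_color : Int) : Decidable (Pre_groups_finder input_board group_color) := by unfold Pre_groups_finder; infer_instance

def pvWitness_groups_finder : List (List Int) × Int := ([[1, 0], [1, 1]], 1)

def Spec_groups_finder (input_board : List (List Int)) (group_color : Int) (out : List (List (List Int))) : Prop := out = groups_finder_alt input_board group_color
instance (input_board : List (List Int)) (group_color : Int) (out : List (List (List Int))) : Decidable (Spec_groups_finder input_board group_color out) := by unfold Spec_groups_finder; infer_instance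

-- ===== CLAIM (what is proved, stated in full; the proofs are below) =====
def Claim_equal_groups_finder : Prop := ∀ (input_board : List (List Int)) (group_color : Int), Dom_groups_finder input_board group_color → Pre_groups_finder input_board group_color → Spec_groups_finder input_board group_color (groups_finder input_board group_color)

-- ===== LEMMAS AND PROOFS =====

-- proof-only intermediate: the queue-based BFS with a 'seen' set (one pop per fuel unit).
-- A ≡ bfsQ by the frontier/expanded ↔ seen simulation; bfsQ ≡ bfsL by the chunk lemma below.
def bfsQ (input_board : List (List Int)) (group_color : Int) (N : Nat) :
    Nat → List (Int × Int) → PySem.Set (Int × Int) → List (List Int) → List (List Int)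
  | 0, _, _, group => group
  | fuel+1, queue, seen, group =>
    match queue with
    | [] => group
    | (m, n) :: rest =>
      let group' := group ++ [[m, n]]
      let qs := (pvNbrs m n).foldl (bstep input_board group_color N) (rest, seen)
      bfsQ input_board group_color N fuel qs.1 qs.2 group'

-- cell as the 2-list A stores
def pvCell (c : Int × Int) : List Int := [c.1, c.2]

-- coordinates of every queued cell lie on the board
def pvRange (N : Nat) (q : List (Int × Int)) : Prop :=
  ∀ c ∈ q, 0 ≤ c.1 ∧ c.1 < (N:Int) ∧ 0 ≤ c.2 ∧ c.2 < (N:Int)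

-- mid-iteration invariant: the 'seen' set = A's frontier ∪ expanded ∪ {the popped cell (m,n)}
def pvMid (exp : List (List Int)) (m n : Int) (f : List (List Int)) (s : PySem.Set (Int × Int)) : Prop :=
  ∀ p q : Int, ((p, q) ∈ s) ↔ ([p, q] ∈ f ∨ [p, q] ∈ exp ∨ (p = m ∧ q = n))

-- outer invariant: B's 'assigned' holds exactly the cells of the groups found so far
def pvRel (gs : List (List (List Int))) (s : PySem.Set (Int × Int)) : Prop :=
  ∀ p q : Int, ((p, q) ∈ s) ↔ ∃ g ∈ gs, [p, q] ∈ g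

lemma is_in_groups_iff (gs : List (List (List Int))) (e : List Int) :
    is_in_groups gs e = true ↔ ∃ g ∈ gs, e ∈ g := by
  induction gs with
  | nil => simp [is_in_groups]
  | cons g rest ih =>
    by_cases h : e ∈ g <;> simp [is_in_groups, h, ih]

lemma bfsQ_nil (input_board : List (List Int)) (group_color : Int) (N : Nat)
    (fuel : Nat) (s : PySem.Set (Int × Int)) (g : List (List Int)) :
    bfsQ input_board group_color N fuel [] s g = g := by
  cases fuel <;> rfl

lemma bfsL_nil (input_board : List (List Int)) (group_color : Int) (N : Nat)
    (fuel : Nat) (s : PySem.Set (Int × Int)) (g : List (List Int)) :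
    bfsL input_board group_color N fuel [] s g = (g, s) := by
  cases fuel <;> rfl

lemma pv_step_sim (input_board : List (List Int)) (group_color : Int) (N : Nat)
    (exp : List (List Int)) (m n a b : Int)
    (X : Prop) [Decidable X]
    (hX : X ↔ (0 ≤ a ∧ a < (N:Int) ∧ 0 ≤ b ∧ b < (N:Int)))
    (hne : ¬(a = m ∧ b = n))
    (P : List (Int × Int) × PySem.Set (Int × Int))
    (hr : pvRange N P.1)
    (hmid : pvMid exp m n (P.1.map pvCell) P.2) :
    ((if decide X && (pvAt input_board a b == group_color)
         && !((P.1.map pvCell).contains [a,b]) && !(exp.contains [a,b])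
      then P.1.map pvCell ++ [[a,b]] else P.1.map pvCell)
      = (bstep input_board group_color N P (a, b)).1.map pvCell)
    ∧ pvMid exp m n ((bstep input_board group_color N P (a, b)).1.map pvCell)
        (bstep input_board group_color N P (a, b)).2
    ∧ pvRange N (bstep input_board group_color N P (a, b)).1 := by
  obtain ⟨q, s⟩ := P
  simp only at hr hmid ⊢
  have hs : ((a, b) ∈ s) ↔ ([a, b] ∈ q.map pvCell ∨ [a, b] ∈ exp) := by
    rw [hmid a b]; tauto
  have hcond :
      (decide X && (pvAt input_board a b == group_color)
         && !((q.map pvCell).contains [a, b]) && !(exp.contains [a, b]))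
      = (decide (0 ≤ a) && decide (a < (N:Int)) && decide (0 ≤ b) && decide (b < (N:Int))
         && (pvAt input_board a b == group_color) && !(PySem.Set.contains s (a, b))) := by
    rw [Bool.eq_iff_iff]
    simp only [Bool.and_eq_true, Bool.not_eq_true', decide_eq_true_eq, beq_iff_eq,
      List.contains_eq_mem, decide_eq_false_iff_not, PySem.Set.contains_eq_listContains, hX, hs]
    tauto
  have hred : bstep input_board group_color N (q, s) (a, b)
      = (if (decide (0 ≤ a) && decide (a < (N:Int)) && decide (0 ≤ b) && decide (b < (N:Int))
           && (pvAt input_board a b == group_color) && !(PySem.Set.contains s (a, b)))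
         then (q ++ [(a, b)], PySem.Set.add s (a, b)) else (q, s)) := rfl
  rw [hred, hcond]
  cases hcB : (decide (0 ≤ a) && decide (a < (N:Int)) && decide (0 ≤ b) && decide (b < (N:Int))
      && (pvAt input_board a b == group_color) && !(PySem.Set.contains s (a, b))) with
  | false => simp only [Bool.false_eq_true, if_false]; exact ⟨trivial, hmid, hr⟩
  | true =>
    simp only [if_true]
    refine ⟨by simp [pvCell], ?_, ?_⟩
    · intro p q'
      rw [PySem.Set.mem_add, hmid p q']
      simp only [List.map_append, List.map_cons, List.map_nil, pvCell, List.mem_append,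
        List.mem_singleton, List.cons.injEq, and_true, Prod.mk.injEq]
      clear hcond hred hcB hs hmid hr hne hX
      tauto
    · simp only [Bool.and_eq_true, decide_eq_true_eq] at hcB
      intro c hc
      rcases List.mem_append.mp hc with h1 | h1
      · exact hr c h1
      · simp only [List.mem_singleton] at h1
        subst h1
        exact ⟨hcB.1.1.1.1.1, hcB.1.1.1.1.2, hcB.1.1.1.2, hcB.1.1.2⟩

lemma pv_bfs_sim (input_board : List (List Int)) (group_color : Int) (N : Nat) :
    ∀ (fuel : Nat) (queue : List (Int × Int)) (exp : List (List Int)) (s : PySem.Set (Int × Int)),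
    pvRange N queue →
    (∀ p q : Int, ((p, q) ∈ s) ↔ ([p, q] ∈ queue.map pvCell ∨ [p, q] ∈ exp)) →
    bfsA input_board group_color N fuel (queue.map pvCell) exp
      = bfsQ input_board group_color N fuel queue s exp := by
  intro fuel
  induction fuel with
  | zero => intro queue exp s _ _; rfl
  | succ fuel ih =>
    intro queue exp s hr hinv
    match queue with
    | [] => rfl
    | (m, n) :: rest =>
      have hm := hr (m, n) (List.mem_cons_self ..)
      obtain ⟨hm0, hm1, hm2, hm3⟩ := hm
      have hg1 : PySem.List.pyGetD [m, n] 1 0 = n := by simp [pysem]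
      have hr' : pvRange N rest := fun c hc => hr c (List.mem_cons_of_mem _ hc)
      have hmid0 : pvMid exp m n (List.map pvCell rest) s := by
        intro p q
        rw [hinv p q]
        simp only [List.map_cons, pvCell, List.mem_cons, List.cons.injEq, and_true]
        tauto
      simp only [List.map_cons, pvCell]
      simp only [bfsA, bfsQ, pvNbrs, List.foldl_cons, List.foldl_nil,
        PySem.List.pyGetD_zero_cons, hg1]
      obtain ⟨h1f, h1mid, h1r⟩ := pv_step_sim input_board group_color N exp m n (m+1) n
        (m+1 < (N:Int)) (by omega) (by omega) (rest, s) hr' hmid0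
      rw [h1f]
      obtain ⟨h2f, h2mid, h2r⟩ := pv_step_sim input_board group_color N exp m n (m-1) n
        (0 ≤ m-1) (by omega) (by omega) _ h1r h1mid
      rw [h2f]
      obtain ⟨h3f, h3mid, h3r⟩ := pv_step_sim input_board group_color N exp m n m (n+1)
        (n+1 < (N:Int)) (by omega) (by omega) _ h2r h2mid
      rw [h3f]
      obtain ⟨h4f, h4mid, h4r⟩ := pv_step_sim input_board group_color N exp m n m (n-1)
        (0 ≤ n-1) (by omega) (by omega) _ h3r h3mid
      rw [h4f]
      set P4 := bstep input_board group_color N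
          (bstep input_board group_color N
            (bstep input_board group_color N
              (bstep input_board group_color N (rest, s) (m + 1, n)) (m - 1, n))
            (m, n + 1)) (m, n - 1) with hP4
      rcases hql : P4.1 with _ | ⟨c, q'⟩
      · simp [bfsQ_nil]
      · rw [hql] at h4r h4mid
        simp only [List.map_cons, List.isEmpty_cons, Bool.false_eq_true, if_false]
        refine ih (c :: q') (exp ++ [[m, n]]) P4.2 h4r ?_
        intro p q
        rw [h4mid p q]
        simp only [List.map_cons, List.mem_append, List.mem_singleton, List.cons.injEq, and_true]

-- ----- queue ≡ layered -----

-- the cells a run of bstep over 'cands' appends (depends only on the seen set, not on the list acc)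
def pvNew (input_board : List (List Int)) (group_color : Int) (N : Nat) :
    List (Int × Int) → PySem.Set (Int × Int) → List (Int × Int)
  | [], _ => []
  | c :: t, s =>
    if decide (0 ≤ c.1) && decide (c.1 < (N:Int)) && decide (0 ≤ c.2) && decide (c.2 < (N:Int))
       && (pvAt input_board c.1 c.2 == group_color) && !(PySem.Set.contains s c)
    then c :: pvNew input_board group_color N t (PySem.Set.add s c)
    else pvNew input_board group_color N t s


lemma bstep_pair (input_board : List (List Int)) (group_color : Int) (N : Nat)
    (X : List (Int × Int)) (s : PySem.Set (Int × Int)) (c : Int × Int) :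
    bstep input_board group_color N (X, s) c
      = if decide (0 ≤ c.1) && decide (c.1 < (N:Int)) && decide (0 ≤ c.2) && decide (c.2 < (N:Int))
           && (pvAt input_board c.1 c.2 == group_color) && !(PySem.Set.contains s c)
        then (X ++ [c], PySem.Set.add s c) else (X, s) := rfl

lemma pvFold_rep (input_board : List (List Int)) (group_color : Int) (N : Nat) :
    ∀ (cands : List (Int × Int)) (X : List (Int × Int)) (s : PySem.Set (Int × Int)),
    cands.foldl (bstep input_board group_color N) (X, s)
      = (X ++ pvNew input_board group_color N cands s,
         PySem.Set.update s (pvNew input_board group_color N cands s)) := by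
  intro cands
  induction cands with
  | nil => intro X s; simp [pvNew, PySem.Set.update]
  | cons c t ih =>
    intro X s
    cases hG : (decide (0 ≤ c.1) && decide (c.1 < (N:Int)) && decide (0 ≤ c.2)
        && decide (c.2 < (N:Int)) && (pvAt input_board c.1 c.2 == group_color)
        && !(PySem.Set.contains s c)) with
    | false =>
      simp only [List.foldl_cons, pvNew, bstep_pair]
      rw [hG]
      simp only [Bool.false_eq_true, if_false]
      exact ih X s
    | true =>
      simp only [List.foldl_cons, pvNew, bstep_pair]
      rw [hG]
      simp only [if_true]
      rw [ih]
      simp [PySem.Set.update_cons, List.append_assoc]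

lemma pvNew_props (input_board : List (List Int)) (group_color : Int) (N : Nat) :
    ∀ (cands : List (Int × Int)) (s : PySem.Set (Int × Int)),
    (∀ c ∈ pvNew input_board group_color N cands s,
       (0 ≤ c.1 ∧ c.1 < (N:Int) ∧ 0 ≤ c.2 ∧ c.2 < (N:Int)) ∧ c ∉ s)
    ∧ (pvNew input_board group_color N cands s).Nodup := by
  intro cands
  induction cands with
  | nil => intro s; simp [pvNew]
  | cons c t ih =>
    intro s
    cases hG : (decide (0 ≤ c.1) && decide (c.1 < (N:Int)) && decide (0 ≤ c.2)
        && decide (c.2 < (N:Int)) && (pvAt input_board c.1 c.2 == group_color)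
        && !(PySem.Set.contains s c)) with
    | false =>
      simp only [pvNew]
      rw [hG]
      simpa using ih s
    | true =>
      simp only [pvNew]
      rw [hG]
      simp only [if_true]
      obtain ⟨ihm, ihn⟩ := ih (PySem.Set.add s c)
      simp only [Bool.and_eq_true, Bool.not_eq_true', decide_eq_true_eq,
        PySem.Set.contains_eq_listContains, List.contains_eq_mem, decide_eq_false_iff_not] at hG
      constructor
      · intro d hd
        rcases List.mem_cons.mp hd with rfl | hd
        · exact ⟨⟨hG.1.1.1.1.1, hG.1.1.1.1.2, hG.1.1.1.2, hG.1.1.2⟩, hG.2⟩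
        · have := ihm d hd
          refine ⟨this.1, fun hds => this.2 ?_⟩
          rw [PySem.Set.mem_add]; exact Or.inl hds
      · refine List.nodup_cons.mpr ⟨fun hc => ?_, ihn⟩
        exact (ihm c hc).2 (by rw [PySem.Set.mem_add]; exact Or.inr rfl)

lemma pvNew_append (input_board : List (List Int)) (group_color : Int) (N : Nat) :
    ∀ (a b : List (Int × Int)) (s : PySem.Set (Int × Int)),
    pvNew input_board group_color N (a ++ b) s
      = pvNew input_board group_color N a s
        ++ pvNew input_board group_color N b
             (PySem.Set.update s (pvNew input_board group_color N a s)) := by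
  intro a
  induction a with
  | nil => intro b s; simp [pvNew, PySem.Set.update]
  | cons c t ih =>
    intro b s
    cases hG : (decide (0 ≤ c.1) && decide (c.1 < (N:Int)) && decide (0 ≤ c.2)
        && decide (c.2 < (N:Int)) && (pvAt input_board c.1 c.2 == group_color)
        && !(PySem.Set.contains s c)) with
    | false =>
      simp only [List.cons_append, pvNew]
      rw [hG]
      simpa using ih b s
    | true =>
      simp only [List.cons_append, pvNew]
      rw [hG]
      simp only [if_true, List.cons_append, List.cons.injEq, true_and]
      rw [ih b (PySem.Set.add s c), PySem.Set.update_cons]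

-- the fresh cells one whole layer contributes
def pvNF (input_board : List (List Int)) (group_color : Int) (N : Nat)
    (lvl : List (Int × Int)) (s : PySem.Set (Int × Int)) : List (Int × Int) :=
  pvNew input_board group_color N (lvl.flatMap (fun c => pvNbrs c.1 c.2)) s

lemma pvCollect_rep (input_board : List (List Int)) (group_color : Int) (N : Nat) :
    ∀ (lvl : List (Int × Int)) (X : List (Int × Int)) (s : PySem.Set (Int × Int)),
    pvCollect input_board group_color N lvl (X, s)
      = (X ++ pvNF input_board group_color N lvl s,
         PySem.Set.update s (pvNF input_board group_color N lvl s)) := by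
  intro lvl
  have hflat : ∀ (acc : List (Int × Int) × PySem.Set (Int × Int)),
      pvCollect input_board group_color N lvl acc
        = (lvl.flatMap (fun c => pvNbrs c.1 c.2)).foldl (bstep input_board group_color N) acc := by
    induction lvl with
    | nil => intro acc; simp [pvCollect]
    | cons c t ih =>
      intro acc
      simp only [pvCollect, List.foldl_cons, List.flatMap_cons, List.foldl_append]
      exact ih _
  intro X s
  rw [hflat, pvFold_rep]
  rfl

-- a Nodup list of on-board cells has at most N*N elements
lemma pv_card_bound (N : Nat) (s : List (Int × Int)) (hnd : s.Nodup)
    (hr : ∀ c ∈ s, 0 ≤ c.1 ∧ c.1 < (N:Int) ∧ 0 ≤ c.2 ∧ c.2 < (N:Int)) :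
    s.length ≤ N * N := by
  classical
  have hcard : s.toFinset.card = s.length := List.toFinset_card_of_nodup hnd
  have hsub : s.toFinset ⊆ (Finset.Icc (0:ℤ) ((N:ℤ) - 1)) ×ˢ (Finset.Icc (0:ℤ) ((N:ℤ) - 1)) := by
    intro c hc
    have := hr c (List.mem_toFinset.mp hc)
    simp only [Finset.mem_product, Finset.mem_Icc]
    omega
  have hle := Finset.card_le_card hsub
  rw [hcard, Finset.card_product] at hle
  simp only [Int.card_Icc] at hle
  calc s.length ≤ ((N:ℤ) - 1 + 1 - 0).toNat * ((N:ℤ) - 1 + 1 - 0).toNat := hle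
    _ = N * N := by simp

-- chunk lemma: the queue BFS run over one whole layer equals one layered step
lemma pv_chunk (input_board : List (List Int)) (group_color : Int) (N : Nat) :
    ∀ (lvl acc : List (Int × Int)) (s : PySem.Set (Int × Int)) (g : List (List Int)) (fuel : Nat),
    bfsQ input_board group_color N (lvl.length + fuel) (lvl ++ acc) s g
      = bfsQ input_board group_color N fuel
          (acc ++ pvNF input_board group_color N lvl s)
          (PySem.Set.update s (pvNF input_board group_color N lvl s))
          (g ++ lvl.map pvCell) := by
  intro lvl
  induction lvl with
  | nil =>
    intro acc s g fuel
    simp [pvNF, pvNew, PySem.Set.update]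
  | cons c t ih =>
    intro acc s g fuel
    obtain ⟨m, n⟩ := c
    have hstep : bfsQ input_board group_color N (t.length + fuel + 1) ((m, n) :: (t ++ acc)) s g
        = bfsQ input_board group_color N (t.length + fuel)
            ((pvNbrs m n).foldl (bstep input_board group_color N) (t ++ acc, s)).1
            ((pvNbrs m n).foldl (bstep input_board group_color N) (t ++ acc, s)).2
            (g ++ [[m, n]]) := rfl
    have hlen : (((m, n) :: t).length + fuel) = t.length + fuel + 1 := by
      simp [List.length_cons]; omega
    rw [List.cons_append, hlen, hstep, pvFold_rep]
    have hassoc : (t ++ acc) ++ pvNew input_board group_color N (pvNbrs m n) s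
        = t ++ (acc ++ pvNew input_board group_color N (pvNbrs m n) s) := by
      simp [List.append_assoc]
    rw [hassoc, ih]
    have hNF : pvNF input_board group_color N ((m, n) :: t) s
        = pvNew input_board group_color N (pvNbrs m n) s
          ++ pvNF input_board group_color N t
               (PySem.Set.update s (pvNew input_board group_color N (pvNbrs m n) s)) := by
      simp only [pvNF, List.flatMap_cons]
      exact pvNew_append input_board group_color N _ _ s
    rw [hNF, PySem.Set.update_append]
    simp [List.append_assoc, pvCell]

-- the simulation: with enough fuel on both sides, the queue BFS computes the first
-- component of the layered BFS, whose final 'seen' is the initial one plus the group's cells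
lemma pv_lvl_sim (input_board : List (List Int)) (group_color : Int) (N : Nat) :
    ∀ (fuelQ : Nat), ∀ (fuelL : Nat) (lvl : List (Int × Int)) (s : PySem.Set (Int × Int))
      (g : List (List Int)),
    (∀ c ∈ lvl, c ∈ s) → s.Nodup →
    (∀ c ∈ s, 0 ≤ c.1 ∧ c.1 < (N:Int) ∧ 0 ≤ c.2 ∧ c.2 < (N:Int)) →
    fuelQ + s.length ≥ lvl.length + N * N → fuelL + s.length ≥ 1 + N * N →
    (bfsQ input_board group_color N fuelQ lvl s g
       = (bfsL input_board group_color N fuelL lvl s g).1)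
    ∧ ∃ D, (bfsL input_board group_color N fuelL lvl s g).1 = g ++ D
        ∧ (∀ c ∈ lvl, pvCell c ∈ D)
        ∧ (∀ p q : Int, ((p, q) ∈ (bfsL input_board group_color N fuelL lvl s g).2
             ↔ (p, q) ∈ s ∨ [p, q] ∈ D)) := by
  intro fuelQ
  induction fuelQ using Nat.strong_induction_on with
  | _ fuelQ ih =>
  intro fuelL lvl s g hsub hnd hrg h4 h5
  have hsle : s.length ≤ N * N := pv_card_bound N s hnd hrg
  match lvl with
  | [] =>
    rw [bfsQ_nil, bfsL_nil]
    exact ⟨rfl, [], by simp, by simp, fun p q => by simp⟩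
  | c :: t =>
    have hL : (c :: t).length = t.length + 1 := by simp
    have hfge : fuelQ ≥ (c :: t).length := by omega
    have hfL : fuelL ≥ 1 := by omega
    obtain ⟨fL, rfl⟩ : ∃ fL, fuelL = fL + 1 := ⟨fuelL - 1, by omega⟩
    -- nf properties
    obtain ⟨hnfm, hnfnd⟩ := pvNew_props input_board group_color N
      ((c :: t).flatMap (fun x => pvNbrs x.1 x.2)) s
    have hnfm' : ∀ x ∈ pvNF input_board group_color N (c :: t) s,
        ((0 ≤ x.1 ∧ x.1 < (N:Int) ∧ 0 ≤ x.2 ∧ x.2 < (N:Int)) ∧ x ∉ s) := hnfm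
    have hnfnd' : (pvNF input_board group_color N (c :: t) s).Nodup := hnfnd
    have hupd : PySem.Set.update s (pvNF input_board group_color N (c :: t) s)
        = s ++ pvNF input_board group_color N (c :: t) s :=
      PySem.Set.update_eq_append_of_disjoint s (pvNF input_board group_color N (c :: t) s)
        hnfnd' (fun x hx => (hnfm' x hx).2)
    -- one layered step
    have hLstep : bfsL input_board group_color N (fL+1) (c :: t) s g
        = bfsL input_board group_color N fL (pvNF input_board group_color N (c :: t) s)
            (s ++ pvNF input_board group_color N (c :: t) s)
            (g ++ (c :: t).map pvCell) := by
      simp only [bfsL, pvCollect_rep, List.nil_append, hupd]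
      rfl
    -- one queue chunk
    have hQ := pv_chunk input_board group_color N (c :: t) [] s g (fuelQ - (c :: t).length)
    rw [List.append_nil, List.nil_append,
      show (c :: t).length + (fuelQ - (c :: t).length) = fuelQ from by omega, hupd] at hQ
    -- case on whether a fresh wavefront exists
    rcases hnfl : pvNF input_board group_color N (c :: t) s with _ | ⟨d, nf0⟩
    · -- no fresh cells: both sides stop after this layer
      rw [hnfl] at hQ hLstep
      rw [hQ, bfsQ_nil, hLstep, bfsL_nil]
      refine ⟨by simp, (c :: t).map pvCell, by simp, fun x hx => List.mem_map_of_mem hx, ?_⟩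
      intro p q
      simp only [List.append_nil, List.mem_map]
      constructor
      · exact fun h => Or.inl h
      · rintro (h | ⟨x, hx, hcx⟩)
        · exact h
        · have : x = (p, q) := by
            simp only [pvCell, List.cons.injEq, and_true] at hcx
            exact Prod.ext hcx.1 hcx.2
          exact this ▸ hsub x hx
    · -- fresh wavefront: recurse
      rw [hnfl] at hQ hLstep hnfm' hnfnd' 
      have hdisj : (s ++ (d :: nf0)).Nodup := by
        rw [List.nodup_append]
        exact ⟨hnd, hnfnd', fun a ha b hb he => (hnfm' b hb).2 (he ▸ ha)⟩
      have hrg' : ∀ x ∈ s ++ (d :: nf0),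
          0 ≤ x.1 ∧ x.1 < (N:Int) ∧ 0 ≤ x.2 ∧ x.2 < (N:Int) := by
        intro x hx
        rcases List.mem_append.mp hx with hx | hx
        · exact hrg x hx
        · exact (hnfm' x hx).1
      have hlen' : (s ++ (d :: nf0)).length = s.length + (nf0.length + 1) := by simp
      obtain ⟨hi, D', hD1, hD2, hD3⟩ :=
        ih (fuelQ - (c :: t).length) (by omega) fL (d :: nf0) (s ++ (d :: nf0))
          (g ++ (c :: t).map pvCell)
          (fun x hx => List.mem_append.mpr (Or.inr hx)) hdisj hrg'
          (by simp only [hlen', List.length_cons]; omega)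
          (by simp only [hlen']; omega)
      refine ⟨by rw [hQ, hLstep, hi], (c :: t).map pvCell ++ D', ?_, ?_, ?_⟩
      · rw [hLstep, hD1, List.append_assoc]
      · intro x hx
        exact List.mem_append.mpr (Or.inl (List.mem_map_of_mem hx))
      · intro p q
        rw [hLstep, hD3 p q]
        simp only [List.mem_append, List.mem_map]
        constructor
        · rintro ((h | h) | h)
          · exact Or.inl h
          · exact Or.inr (Or.inr (hD2 (p, q) h))
          · exact Or.inr (Or.inr h)
        · rintro (h | (⟨x, hx, hcx⟩ | h))
          · exact Or.inl (Or.inl h)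
          · have hxs : x = (p, q) := by
              simp only [pvCell, List.cons.injEq, and_true] at hcx
              exact Prod.ext hcx.1 hcx.2
            exact Or.inl (Or.inl (hxs ▸ hsub x hx))
          · exact Or.inr h

lemma pv_cell_sim (input_board : List (List Int)) (group_color : Int) (N : Nat)
    (i j : Nat) (hi : i < N) (hj : j < N)
    (gs : List (List (List Int))) (s : PySem.Set (Int × Int)) (h : pvRel gs s) :
    ((if (pvAt input_board (i:Int) (j:Int) == group_color)
         && !(is_in_groups gs [(i:Int), (j:Int)])
      then gs ++ [bfsA input_board group_color N (N*N) [[(i:Int), (j:Int)]] []]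
      else gs)
      = (if (pvAt input_board (i:Int) (j:Int) == group_color)
            && !(PySem.Set.contains s ((i:Int), (j:Int)))
         then
           let r := bfsL input_board group_color N (N*N) [((i:Int), (j:Int))]
                      (PySem.Set.ofList [((i:Int), (j:Int))]) []
           (PySem.Set.union s r.2, gs ++ [r.1])
         else (s, gs)).2)
    ∧ pvRel (if (pvAt input_board (i:Int) (j:Int) == group_color)
            && !(PySem.Set.contains s ((i:Int), (j:Int)))
         then
           let r := bfsL input_board group_color N (N*N) [((i:Int), (j:Int))]
                      (PySem.Set.ofList [((i:Int), (j:Int))]) []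
           (PySem.Set.union s r.2, gs ++ [r.1])
         else (s, gs)).2
        (if (pvAt input_board (i:Int) (j:Int) == group_color)
            && !(PySem.Set.contains s ((i:Int), (j:Int)))
         then
           let r := bfsL input_board group_color N (N*N) [((i:Int), (j:Int))]
                      (PySem.Set.ofList [((i:Int), (j:Int))]) []
           (PySem.Set.union s r.2, gs ++ [r.1])
         else (s, gs)).1 := by
  have hcond : ((pvAt input_board (i:Int) (j:Int) == group_color)
        && !(is_in_groups gs [(i:Int), (j:Int)]))
      = ((pvAt input_board (i:Int) (j:Int) == group_color)
        && !(PySem.Set.contains s ((i:Int), (j:Int)))) := by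
    rw [Bool.eq_iff_iff]
    simp only [Bool.and_eq_true, Bool.not_eq_true', Bool.eq_false_iff, ne_eq,
      PySem.Set.contains_eq_listContains, List.contains_eq_mem, decide_eq_true_eq,
      is_in_groups_iff, h (i:Int) (j:Int)]
  rw [hcond]
  have hofl : PySem.Set.ofList [((i:Int), (j:Int))] = [((i:Int), (j:Int))] := rfl
  have hlvl := pv_lvl_sim input_board group_color N (N*N) (N*N)
    [((i:Int), (j:Int))] (PySem.Set.ofList [((i:Int), (j:Int))]) []
    (fun c hc => hc) (by rw [hofl]; simp)
    (by
      rw [hofl]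
      intro c hc
      simp only [List.mem_singleton] at hc
      subst hc
      refine ⟨by simp, by simp; omega, by simp, by simp; omega⟩)
    (by rw [hofl]; simp only [List.length_cons, List.length_nil]; omega)
    (by rw [hofl]; simp only [List.length_cons, List.length_nil]; omega)
  obtain ⟨hQL, D, hD1, hD2, hD3⟩ := hlvl
  have hg : bfsA input_board group_color N (N*N) [[(i:Int), (j:Int)]] []
      = bfsQ input_board group_color N (N*N) [((i:Int), (j:Int))]
          (PySem.Set.ofList [((i:Int), (j:Int))]) [] := by
    have hrange : pvRange N [((i:Int), (j:Int))] := by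
      intro c hc
      simp only [List.mem_singleton] at hc
      subst hc
      refine ⟨?_, ?_, ?_, ?_⟩ <;> simp <;> omega
    have hinv : ∀ p q : Int, ((p, q) ∈ PySem.Set.ofList [((i:Int), (j:Int))])
        ↔ ([p, q] ∈ List.map pvCell [((i:Int), (j:Int))] ∨ [p, q] ∈ ([] : List (List Int))) := by
      intro p q
      simp [PySem.Set.mem_ofList, pvCell, Prod.ext_iff, List.cons.injEq]
    have := pv_bfs_sim input_board group_color N (N*N) [((i:Int), (j:Int))] []
      (PySem.Set.ofList [((i:Int), (j:Int))]) hrange hinv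
    simpa [pvCell] using this
  cases hcB : ((pvAt input_board (i:Int) (j:Int) == group_color)
      && !(PySem.Set.contains s ((i:Int), (j:Int)))) with
  | false => simp only [Bool.false_eq_true, if_false]; exact ⟨trivial, h⟩
  | true =>
    simp only [if_true]
    have hA : bfsA input_board group_color N (N*N) [[(i:Int), (j:Int)]] []
        = (bfsL input_board group_color N (N*N) [((i:Int), (j:Int))]
            (PySem.Set.ofList [((i:Int), (j:Int))]) []).1 := by
      rw [hg, hQL]
    refine ⟨by rw [hA], ?_⟩
    intro p q
    simp only [PySem.Set.mem_union, hD3 p q]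
    rw [List.nil_append] at hD1
    constructor
    · rintro (hps | (hps | hps))
      · obtain ⟨g', hg', hpq⟩ := (h p q).mp hps
        exact ⟨g', List.mem_append.mpr (Or.inl hg'), hpq⟩
      · rw [hofl] at hps
        simp only [List.mem_singleton, Prod.mk.injEq] at hps
        refine ⟨_, List.mem_append.mpr (Or.inr (List.mem_singleton.mpr rfl)), ?_⟩
        rw [hD1]
        have := hD2 ((i:Int), (j:Int)) (List.mem_singleton.mpr rfl)
        simpa [pvCell, hps.1, hps.2] using this
      · exact ⟨_, List.mem_append.mpr (Or.inr (List.mem_singleton.mpr rfl)), by rw [hD1]; exact hps⟩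
    · rintro ⟨g', hg', hpq⟩
      rcases List.mem_append.mp hg' with hg' | hg'
      · exact Or.inl ((h p q).mpr ⟨g', hg', hpq⟩)
      · simp only [List.mem_singleton] at hg'
        subst hg'
        rw [hD1] at hpq
        exact Or.inr (Or.inr hpq)

lemma pv_row_sim (input_board : List (List Int)) (group_color : Int) (N : Nat)
    (i : Nat) (hi : i < N) :
    ∀ (l : List Nat), (∀ j ∈ l, j < N) →
    ∀ (gs : List (List (List Int))) (s : PySem.Set (Int × Int)), pvRel gs s →
    (l.foldl (fun groups (j : Nat) =>
        if (pvAt input_board (i:Int) (j:Int) == group_color)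
           && !(is_in_groups groups [(i:Int), (j:Int)])
        then groups ++ [bfsA input_board group_color N (N*N) [[(i:Int), (j:Int)]] []]
        else groups) gs
      = (l.foldl (fun st (j : Nat) =>
          if (pvAt input_board (i:Int) (j:Int) == group_color)
             && !(PySem.Set.contains st.1 ((i:Int), (j:Int)))
          then
            let r := bfsL input_board group_color N (N*N) [((i:Int), (j:Int))]
                       (PySem.Set.ofList [((i:Int), (j:Int))]) []
            (PySem.Set.union st.1 r.2, st.2 ++ [r.1])
          else st) (s, gs)).2)
    ∧ pvRel (l.foldl (fun st (j : Nat) =>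
          if (pvAt input_board (i:Int) (j:Int) == group_color)
             && !(PySem.Set.contains st.1 ((i:Int), (j:Int)))
          then
            let r := bfsL input_board group_color N (N*N) [((i:Int), (j:Int))]
                       (PySem.Set.ofList [((i:Int), (j:Int))]) []
            (PySem.Set.union st.1 r.2, st.2 ++ [r.1])
          else st) (s, gs)).2
        (l.foldl (fun st (j : Nat) =>
          if (pvAt input_board (i:Int) (j:Int) == group_color)
             && !(PySem.Set.contains st.1 ((i:Int), (j:Int)))
          then
            let r := bfsL input_board group_color N (N*N) [((i:Int), (j:Int))]
                       (PySem.Set.ofList [((i:Int), (j:Int))]) []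
            (PySem.Set.union st.1 r.2, st.2 ++ [r.1])
          else st) (s, gs)).1 := by
  intro l
  induction l with
  | nil => intro _ gs s hrel; exact ⟨rfl, hrel⟩
  | cons j t iht =>
    intro hl gs s hrel
    simp only [List.foldl_cons]
    obtain ⟨heq, hrel'⟩ := pv_cell_sim input_board group_color N i j hi
      (hl j (List.mem_cons_self ..)) gs s hrel
    rw [heq]
    exact iht (fun x hx => hl x (List.mem_cons_of_mem _ hx)) _ _ hrel'

lemma pv_col_sim (input_board : List (List Int)) (group_color : Int) (N : Nat) :
    ∀ (li : List Nat), (∀ i ∈ li, i < N) →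
    ∀ (gs : List (List (List Int))) (s : PySem.Set (Int × Int)), pvRel gs s →
    li.foldl (fun groups (i : Nat) => (List.range N).foldl (fun groups (j : Nat) =>
        if (pvAt input_board (i:Int) (j:Int) == group_color)
           && !(is_in_groups groups [(i:Int), (j:Int)])
        then groups ++ [bfsA input_board group_color N (N*N) [[(i:Int), (j:Int)]] []]
        else groups) groups) gs
      = (li.foldl (fun st (i : Nat) => (List.range N).foldl (fun st (j : Nat) =>
          if (pvAt input_board (i:Int) (j:Int) == group_color)
             && !(PySem.Set.contains st.1 ((i:Int), (j:Int)))
          then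
            let r := bfsL input_board group_color N (N*N) [((i:Int), (j:Int))]
                       (PySem.Set.ofList [((i:Int), (j:Int))]) []
            (PySem.Set.union st.1 r.2, st.2 ++ [r.1])
          else st) st) (s, gs)).2 := by
  intro li
  induction li with
  | nil => intro _ gs s _; rfl
  | cons i t iht =>
    intro hl gs s hrel
    simp only [List.foldl_cons]
    obtain ⟨heq, hrel'⟩ := pv_row_sim input_board group_color N i (hl i (List.mem_cons_self ..))
      (List.range N) (fun j hj => List.mem_range.mp hj) gs s hrel
    rw [heq]
    exact iht (fun x hx => hl x (List.mem_cons_of_mem _ hx)) _ _ hrel'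

-- ===== VERDICT (by name: the statement is the Claim_ definition above) =====
theorem groups_finder_spec : Claim_equal_groups_finder := by
  unfold Claim_equal_groups_finder
  intro input_board group_color _ _
  simp only [Spec_groups_finder, groups_finder, groups_finder_alt]
  exact pv_col_sim input_board group_color ((PySem.List.pyGetD input_board 0 []).length)
    (List.range ((PySem.List.pyGetD input_board 0 []).length))
    (fun i hi => List.mem_range.mp hi) [] PySem.Set.empty
    (by intro p q; simp [PySem.Set.empty])
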